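-- pv_equiv track=rewrite | github.com/aremath/texture_gen | prelim.py | min_length_keys
-- ===== SOURCE A (Python) =====
-- def min_length_keys(dictionary):
-- 	'''Returns a list of keys for dict whose values have the least length'''
-- 	out = []
-- 	# set the min to the length of the first element
-- 	min_l = len(dictionary[list(dictionary.keys())[0]])
-- 	# find the true minimum
-- 	for key, val in dictionary.items():
-- 		if len(val) < min_l:
-- 			min_l = len(val)
-- 	# construct the list of output keys
-- 	for key, val in dictionary.items():
-- 		if len(val) == min_l:
-- 			out.append(key)
-- 	return out, min_l
-- ===== SOURCE B (Python) =====
-- def min_length_keys(dictionary):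
--     '''Returns a list of keys for dict whose values have the least length'''
--     # single pass: seed the minimum from the first key (raises IndexError on an empty dict, like A)
--     min_l = len(dictionary[list(dictionary)[0]])
--     out = []
--     for key, val in dictionary.items():
--         l = len(val)
--         if l < min_l:
--             min_l = l
--             out = [key]
--         elif l == min_l:
--             out.append(key)
--     return out, min_l
-- ===== Notes on version B (the rewrite author's own statement) =====
-- stated objective: simpler
-- what changed: Replaces A's two passes over the dict (one to find the minimum length, one to collect matching keys) with a single pass that resets the output list whenever a strictly smaller length is seen.
import Mathlib
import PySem

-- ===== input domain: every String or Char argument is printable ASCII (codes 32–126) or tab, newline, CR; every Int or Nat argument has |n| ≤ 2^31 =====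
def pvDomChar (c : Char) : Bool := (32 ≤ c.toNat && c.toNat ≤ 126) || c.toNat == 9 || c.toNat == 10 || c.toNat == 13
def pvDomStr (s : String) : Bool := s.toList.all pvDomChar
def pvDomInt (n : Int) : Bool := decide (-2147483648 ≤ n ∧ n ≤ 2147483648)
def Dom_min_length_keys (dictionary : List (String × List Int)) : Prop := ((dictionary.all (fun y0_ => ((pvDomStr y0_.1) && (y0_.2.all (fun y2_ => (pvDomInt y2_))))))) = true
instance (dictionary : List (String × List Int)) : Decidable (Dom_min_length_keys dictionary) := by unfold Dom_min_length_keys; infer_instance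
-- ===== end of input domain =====

-- B replaces A's two passes over the dict with a single pass that resets the key list
-- on a strictly smaller length (simpler decomposition; same O(n) cost).


-- ===== PORT A =====
-- A's first loop: find the true minimum length, seeded with m
def pvMinFold (l : List (String × List Int)) (m : Int) : Int :=
  l.foldl (fun m kv => if (kv.2.length : Int) < m then (kv.2.length : Int) else m) m

-- A's second loop: append each key whose value has length m
def pvCollect (l : List (String × List Int)) (acc : List String) (m : Int) : List String :=
  l.foldl (fun a kv => if (kv.2.length : Int) = m then a ++ [kv.1] else a) acc

def min_length_keys (dictionary : List (String × List Int)) : List String × Int :=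
  match dictionary with
  | [] => ([], 0)   -- unreachable: Python raises IndexError here (excluded by Pre_)
  | (_, v0) :: _ =>
    let min_l := pvMinFold dictionary (v0.length : Int)
    (pvCollect dictionary [] min_l, min_l)

-- ===== PORT B =====
-- B's single-pass step: strictly smaller length resets the key list
def pvStep (st : List String × Int) (kv : String × List Int) : List String × Int :=
  let l := (kv.2.length : Int)
  if l < st.2 then ([kv.1], l)
  else if l = st.2 then (st.1 ++ [kv.1], st.2)
  else st

def min_length_keys_alt (dictionary : List (String × List Int)) : List String × Int :=
  match dictionary with
  | [] => ([], 0)   -- unreachable: Python raises IndexError here (excluded by Pre_)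
  | (_, v0) :: _ => dictionary.foldl pvStep ([], (v0.length : Int))

-- ===== PRECONDITION & SPEC =====
-- Pre_ excludes only the empty dict, on which both A and B raise IndexError.
def Pre_min_length_keys (dictionary : List (String × List Int)) : Prop := dictionary ≠ []
instance (dictionary : List (String × List Int)) : Decidable (Pre_min_length_keys dictionary) := by unfold Pre_min_length_keys; infer_instance
def pvWitness_min_length_keys : (List (String × List Int)) := [("a", [1, 2]), ("b", [3])]

def Spec_min_length_keys (dictionary : List (String × List Int)) (out : List String × Int) : Prop := out = min_length_keys_alt dictionary
instance (dictionary : List (String × List Int)) (out : List String × Int) : Decidable (Spec_min_length_keys dictionary out) := by unfold Spec_min_length_keys; infer_instance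

-- ===== CLAIM (what is proved, stated in full; the proofs are below) =====
def Claim_equal_min_length_keys : Prop := ∀ (dictionary : List (String × List Int)), Dom_min_length_keys dictionary → Pre_min_length_keys dictionary → Spec_min_length_keys dictionary (min_length_keys dictionary)

-- ===== LEMMAS AND PROOFS =====

lemma pvMinFold_le (l : List (String × List Int)) (m : Int) : pvMinFold l m ≤ m := by
  induction l generalizing m with
  | nil => simp [pvMinFold]
  | cons kv t ih =>
    simp only [pvMinFold, List.foldl_cons]
    split
    · exact le_trans (ih _) (le_of_lt (by assumption))
    · exact ih m

lemma pvCollect_cons (kv : String × List Int) (t : List (String × List Int)) (acc : List String) (m : Int) :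
    pvCollect (kv :: t) acc m = pvCollect t (if (kv.2.length : Int) = m then acc ++ [kv.1] else acc) m := by
  simp only [pvCollect, List.foldl_cons]

lemma pvCollect_acc (l : List (String × List Int)) (acc : List String) (m : Int) :
    pvCollect l acc m = acc ++ pvCollect l [] m := by
  induction l generalizing acc with
  | nil => simp [pvCollect]
  | cons kv t ih =>
    rw [pvCollect_cons, pvCollect_cons]
    by_cases h : (kv.2.length : Int) = m
    · rw [if_pos h, if_pos h, ih (acc ++ [kv.1]), ih ([] ++ [kv.1])]; simp
    · rw [if_neg h, if_neg h]; exact ih acc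

lemma pvStep_loop (l : List (String × List Int)) (acc : List String) (m : Int) :
    l.foldl pvStep (acc, m) =
      ((if pvMinFold l m < m then [] else acc) ++ pvCollect l [] (pvMinFold l m),
       pvMinFold l m) := by
  induction l generalizing acc m with
  | nil => simp [pvMinFold, pvCollect]
  | cons kv t ih =>
    simp only [List.foldl_cons]
    have hle := pvMinFold_le t m
    by_cases h1 : (kv.2.length : Int) < m
    · -- strict decrease: B resets acc to [kv.1], A's running minimum becomes kv.2.length
      have hm : pvMinFold (kv :: t) m = pvMinFold t (kv.2.length : Int) := by
        simp [pvMinFold, h1]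
      rw [show pvStep (acc, m) kv = ([kv.1], (kv.2.length : Int)) by simp [pvStep, h1]]
      rw [ih [kv.1] (kv.2.length : Int), hm]
      have hle' := pvMinFold_le t (kv.2.length : Int)
      have hlt : pvMinFold t (kv.2.length : Int) < m := lt_of_le_of_lt hle' h1
      rw [if_pos hlt, pvCollect_cons]
      by_cases h2 : pvMinFold t (kv.2.length : Int) < (kv.2.length : Int)
      · have hne : (kv.2.length : Int) ≠ pvMinFold t (kv.2.length : Int) := by omega
        rw [if_pos h2, if_neg hne]
      · have heq : (kv.2.length : Int) = pvMinFold t (kv.2.length : Int) := by omega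
        rw [if_neg h2, if_pos heq, pvCollect_acc t ([] ++ [kv.1])]
        simp
    · -- no strict decrease: the running minimum over the tail decides everything
      have hm : pvMinFold (kv :: t) m = pvMinFold t m := by simp [pvMinFold, h1]
      rw [hm, pvCollect_cons]
      by_cases h2 : (kv.2.length : Int) = m
      · rw [show pvStep (acc, m) kv = (acc ++ [kv.1], m) by simp [pvStep, h2]]
        rw [ih (acc ++ [kv.1]) m]
        by_cases h3 : pvMinFold t m < m
        · have hne : (kv.2.length : Int) ≠ pvMinFold t m := by omega
          rw [if_pos h3, if_pos h3, if_neg hne]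
        · have heq2 : (kv.2.length : Int) = pvMinFold t m := by omega
          rw [if_neg h3, if_neg h3, if_pos heq2]
          rw [pvCollect_acc t ([] ++ [kv.1])]
          simp
      · rw [show pvStep (acc, m) kv = (acc, m) by simp [pvStep, h2, h1]]
        rw [ih acc m]
        have hne : (kv.2.length : Int) ≠ pvMinFold t m := by omega
        rw [if_neg hne]

-- ===== VERDICT (by name: the statement is the Claim_ definition above) =====
theorem min_length_keys_spec : Claim_equal_min_length_keys := by
  intro d _ hpre
  match d with
  | [] => exact absurd rfl hpre
  | (k0, v0) :: t =>
    show min_length_keys ((k0, v0) :: t) = min_length_keys_alt ((k0, v0) :: t)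
    simp only [min_length_keys, min_length_keys_alt]
    rw [pvStep_loop ((k0, v0) :: t) [] (v0.length : Int)]
    simp
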